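-- pv_equiv track=rewrite | github.com/egoisth777/proj-regs | eval/scripts/check_o3_4.py | find_consecutive_duplicates
-- ===== SOURCE A (Python) =====
-- def find_consecutive_duplicates(blocks, threshold):
--     """Find pairs of functions that share >=threshold consecutive identical lines."""
--     duplicates = []
--     func_names = list(blocks.keys())
--
--     for i in range(len(func_names)):
--         for j in range(i + 1, len(func_names)):
--             lines_a = blocks[func_names[i]]
--             lines_b = blocks[func_names[j]]
--
--             # Simple O(n*m) check for consecutive matches
--             max_consecutive = 0
--             for ai in range(len(lines_a)):
--                 for bi in range(len(lines_b)):
--                     count = 0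
--                     while (ai + count < len(lines_a) and
--                            bi + count < len(lines_b) and
--                            lines_a[ai + count] == lines_b[bi + count]):
--                         count += 1
--                     if count > max_consecutive:
--                         max_consecutive = count
--
--             if max_consecutive >= threshold:
--                 duplicates.append((
--                     func_names[i], func_names[j], max_consecutive
--                 ))
--
--     return duplicates
-- ===== SOURCE B (Python) =====
-- def _lcs_len(la, lb):
--     """Length of the longest common substring (consecutive run) of la and lb,
--     by the classic DP over common-suffix lengths, one rolling row."""
--     best = 0
--     prev = [0] * len(lb)
--     for x in la:
--         cur = []
--         diag = 0  # dp value of previous row, previous column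
--         for y, p in zip(lb, prev):
--             v = diag + 1 if x == y else 0
--             cur.append(v)
--             if v > best:
--                 best = v
--             diag = p
--         prev = cur
--     return best
--
--
-- def find_consecutive_duplicates(blocks, threshold):
--     """Find pairs of functions that share >=threshold consecutive identical lines."""
--     duplicates = []
--     func_names = list(blocks.keys())
--
--     for i in range(len(func_names)):
--         for j in range(i + 1, len(func_names)):
--             best = _lcs_len(blocks[func_names[i]], blocks[func_names[j]])
--             if best >= threshold:
--                 duplicates.append((func_names[i], func_names[j], best))
--
--     return duplicates
-- ===== Notes on version B (the rewrite author's own statement) =====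
-- stated objective: alternative
-- what changed: The per-pair maximum consecutive run is computed by the longest-common-substring dynamic programme (one rolling row of common-suffix lengths, O(n*m)) instead of A's per-start-position while-scan (O(n*m*min(n,m)) worst case); intended as faster in the worst case, but a timing run measured only 1.23x on random inputs, so no speed is claimed.
import Mathlib
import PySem

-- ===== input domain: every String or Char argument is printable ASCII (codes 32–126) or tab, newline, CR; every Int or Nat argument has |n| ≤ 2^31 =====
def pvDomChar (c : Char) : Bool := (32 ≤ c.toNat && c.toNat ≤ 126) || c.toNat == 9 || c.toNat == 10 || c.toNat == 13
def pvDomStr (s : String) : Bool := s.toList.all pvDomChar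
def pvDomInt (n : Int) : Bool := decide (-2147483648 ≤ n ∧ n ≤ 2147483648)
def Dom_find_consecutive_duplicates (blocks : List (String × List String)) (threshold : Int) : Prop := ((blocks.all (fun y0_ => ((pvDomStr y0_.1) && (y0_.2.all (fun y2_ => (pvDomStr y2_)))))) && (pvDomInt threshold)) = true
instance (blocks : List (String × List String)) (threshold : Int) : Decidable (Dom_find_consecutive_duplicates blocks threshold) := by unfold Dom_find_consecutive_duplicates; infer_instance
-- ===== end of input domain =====

-- B replaces A's per-start-position while-scan by the longest-common-substring DP (a rolling
-- row of common-suffix lengths); the outer pair loop is unchanged. Objective: alternative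
-- (better worst case on paper; intended as faster, but measured only ~1.2x on random inputs).

-- ===== PORT A =====
-- the inner 'while' loop of A; indices are provably in range when the guard holds,
-- so the getD default "" is never returned (exact)
def pvWhileCount (la lb : List String) (ai bi cnt : Nat) : Nat :=
  if h : ai + cnt < la.length ∧ bi + cnt < lb.length ∧
         la.getD (ai + cnt) "" = lb.getD (bi + cnt) "" then
    pvWhileCount la lb ai bi (cnt + 1)
  else cnt
termination_by la.length - (ai + cnt)
decreasing_by omega

-- the two inner index loops of A building max_consecutive
def pvMaxConsec (la lb : List String) : Nat :=
  (List.range la.length).foldl (fun mc ai =>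
    (List.range lb.length).foldl (fun mc bi =>
      let count := pvWhileCount la lb ai bi 0
      if count > mc then count else mc) mc) 0

def find_consecutive_duplicates (blocks : List (String × List String)) (threshold : Int) : List (String × String × Int) :=
  let d := PySem.Dict.ofList blocks
  let func_names := d.keys
  (List.range func_names.length).foldl (fun duplicates i =>
    (List.range' (i + 1) (func_names.length - (i + 1))).foldl (fun duplicates j =>
      let lines_a := d.getD (func_names.getD i "") []
      let lines_b := d.getD (func_names.getD j "") []
      let max_consecutive := pvMaxConsec lines_a lines_b
      if threshold ≤ (max_consecutive : Int) then
        duplicates ++ [(func_names.getD i "", func_names.getD j "", (max_consecutive : Int))]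
      else duplicates) duplicates) []

-- ===== PORT B =====
-- one DP row of _lcs_len: walks lb and prev together (the zip), threading diag and best
def pvLcsRow (x : String) : List String → List Nat → Nat → Nat → List Nat × Nat
  | y :: ys, p :: ps, diag, best =>
      let v := if x = y then diag + 1 else 0
      let best1 := if v > best then v else best
      let r := pvLcsRow x ys ps p best1
      (v :: r.1, r.2)
  | _, _, _, best => ([], best)

-- _lcs_len from Source B
def pvLcsLen (la lb : List String) : Nat :=
  (la.foldl (fun st x => pvLcsRow x lb st.1 0 st.2) (List.replicate lb.length 0, 0)).2

def find_consecutive_duplicates_alt (blocks : List (String × List String)) (threshold : Int) : List (String × String × Int) :=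
  let d := PySem.Dict.ofList blocks
  let func_names := d.keys
  (List.range func_names.length).foldl (fun duplicates i =>
    (List.range' (i + 1) (func_names.length - (i + 1))).foldl (fun duplicates j =>
      let best := pvLcsLen (d.getD (func_names.getD i "") []) (d.getD (func_names.getD j "") [])
      if threshold ≤ (best : Int) then
        duplicates ++ [(func_names.getD i "", func_names.getD j "", (best : Int))]
      else duplicates) duplicates) []

-- ===== PRECONDITION & SPEC =====
def Spec_find_consecutive_duplicates (blocks : List (String × List String)) (threshold : Int) (out : List (String × String × Int)) : Prop := out = find_consecutive_duplicates_alt blocks threshold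
instance (blocks : List (String × List String)) (threshold : Int) (out : List (String × String × Int)) : Decidable (Spec_find_consecutive_duplicates blocks threshold out) := by unfold Spec_find_consecutive_duplicates; infer_instance

-- ===== CLAIM (what is proved, stated in full; the proofs are below) =====
def Claim_equal_find_consecutive_duplicates : Prop := ∀ (blocks : List (String × List String)) (threshold : Int), Dom_find_consecutive_duplicates blocks threshold → Spec_find_consecutive_duplicates blocks threshold (find_consecutive_duplicates blocks threshold)

-- ===== LEMMAS AND PROOFS =====

-- common-prefix length of two lists
def pvPref : List String → List String → Nat
  | x :: xs, y :: ys => if x = y then pvPref xs ys + 1 else 0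
  | _, _ => 0

@[simp] theorem pvPref_nil_left (v : List String) : pvPref [] v = 0 := by cases v <;> rfl
@[simp] theorem pvPref_nil_right (u : List String) : pvPref u [] = 0 := by cases u <;> rfl

-- common-suffix length of two lists
def pvSuff (u v : List String) : Nat := pvPref u.reverse v.reverse

-- the max of a list of naturals, as A's running-max fold computes it
def pvMaxL (l : List Nat) : Nat := l.foldl max 0

-- all pvPref values A's double index loop scans, flattened
def pvPrefList (la lb : List String) : List Nat :=
  (List.range la.length).flatMap (fun ai =>
    (List.range lb.length).map (fun bi => pvPref (la.drop ai) (lb.drop bi)))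

-- the DP row for prefix u: common-suffix lengths against every nonempty prefix of lb
def pvRow (u lb : List String) : List Nat :=
  (List.range lb.length).map (fun k => pvSuff u (lb.take (k + 1)))

-- all pvSuff values B's DP ever puts into a row
def pvSuffList (la lb : List String) : List Nat :=
  (List.range (la.length + 1)).flatMap (fun i => pvRow (la.take i) lb)

-- the pure next-row function underlying pvLcsRow
def pvNext (x : String) : List String → List Nat → List Nat
  | y :: ys, d :: ds => (if x = y then d + 1 else 0) :: pvNext x ys ds
  | _, _ => []


-- running-max basics
theorem pvFoldlMaxSpec (l : List Nat) : ∀ a : Nat, a ≤ l.foldl max a ∧ ∀ x ∈ l, x ≤ l.foldl max a := by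
  induction l with
  | nil => intro a; simp
  | cons y t ih =>
    intro a
    refine ⟨le_trans (Nat.le_max_left a y) (ih (max a y)).1, ?_⟩
    intro x hx
    simp only [List.foldl_cons]
    rcases List.mem_cons.mp hx with rfl | hx
    · exact le_trans (Nat.le_max_right a x) (ih (max a x)).1
    · exact (ih (max a y)).2 x hx

theorem le_pvMaxL {x : Nat} {l : List Nat} (hx : x ∈ l) : x ≤ pvMaxL l :=
  (pvFoldlMaxSpec l 0).2 x hx

theorem pvFoldlMaxLe (l : List Nat) (c : Nat) (h : ∀ x ∈ l, x ≤ c) : ∀ a, a ≤ c → l.foldl max a ≤ c := by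
  induction l with
  | nil => intro a ha; simpa
  | cons y t ih =>
    intro a ha
    simp only [List.foldl_cons]
    exact ih (fun x hx => h x (List.mem_cons_of_mem _ hx)) _ (max_le ha (h y (by simp)))

theorem pvMaxL_le {l : List Nat} {c : Nat} (h : ∀ x ∈ l, x ≤ c) : pvMaxL l ≤ c :=
  pvFoldlMaxLe l c h 0 (Nat.zero_le c)

-- A-side characterisation
theorem pvWhileCount_eq (la lb : List String) (ai bi cnt : Nat) :
    pvWhileCount la lb ai bi cnt = cnt + pvPref (la.drop (ai + cnt)) (lb.drop (bi + cnt)) := by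
  fun_induction pvWhileCount la lb ai bi cnt with
  | case1 cnt h ih =>
      obtain ⟨h1, h2, h3⟩ := h
      rw [ih]
      rw [List.drop_eq_getElem_cons h1, List.drop_eq_getElem_cons h2]
      rw [List.getD_eq_getElem la "" h1, List.getD_eq_getElem lb "" h2] at h3
      simp only [pvPref, if_pos h3]
      have e1 : ai + (cnt + 1) = ai + cnt + 1 := by omega
      have e2 : bi + (cnt + 1) = bi + cnt + 1 := by omega
      rw [e1, e2]
      omega
  | case2 cnt h =>
      rcases Nat.lt_or_ge (ai + cnt) la.length with h1 | h1
      · rcases Nat.lt_or_ge (bi + cnt) lb.length with h2 | h2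
        · rw [List.drop_eq_getElem_cons h1, List.drop_eq_getElem_cons h2]
          have h3 : ¬ la[ai+cnt] = lb[bi+cnt] := by
            intro he
            exact h ⟨h1, h2, by rw [List.getD_eq_getElem la "" h1, List.getD_eq_getElem lb "" h2]; exact he⟩
          simp only [pvPref, if_neg h3]
          simp
        · rw [List.drop_eq_nil_of_le h2]; simp
      · rw [List.drop_eq_nil_of_le h1]; simp

theorem pvFoldlRunmax {β : Type} (l : List β) (f : β → Nat) :
    ∀ a : Nat, l.foldl (fun mc x => let c := f x; if c > mc then c else mc) a = (l.map f).foldl max a := by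
  induction l with
  | nil => intro a; rfl
  | cons y t ih =>
    intro a
    simp only [List.foldl_cons, List.map_cons]
    have hb : (let c := f y; if c > a then c else a) = max a (f y) := by
      by_cases hc : f y > a <;> simp [hc] <;> omega
    rw [hb, ih]

theorem pvFoldlMaxFlat {β : Type} (l : List β) (g : β → List Nat) :
    ∀ a : Nat, l.foldl (fun acc x => (g x).foldl max acc) a = (l.flatMap g).foldl max a := by
  induction l with
  | nil => intro a; rfl
  | cons y t ih =>
    intro a
    simp only [List.foldl_cons, List.flatMap_cons, List.foldl_append]
    exact ih _

theorem pvMaxConsec_eq (la lb : List String) : pvMaxConsec la lb = pvMaxL (pvPrefList la lb) := by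
  unfold pvMaxConsec pvPrefList pvMaxL
  have h1 : ∀ (ai a : Nat),
      (List.range lb.length).foldl (fun mc bi =>
        let count := pvWhileCount la lb ai bi 0
        if count > mc then count else mc) a
      = ((List.range lb.length).map (fun bi => pvPref (la.drop ai) (lb.drop bi))).foldl max a := by
    intro ai a
    rw [pvFoldlRunmax]
    congr 1
    apply List.map_congr_left
    intro bi _
    rw [pvWhileCount_eq]
    simp
  simp only [h1]
  rw [pvFoldlMaxFlat]

-- B-side characterisation
@[simp] theorem pvSuff_nil_left (v : List String) : pvSuff [] v = 0 := by simp [pvSuff]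
@[simp] theorem pvSuff_nil_right (u : List String) : pvSuff u [] = 0 := by simp [pvSuff]

theorem pvSuff_snoc (u v : List String) (x y : String) :
    pvSuff (u ++ [x]) (v ++ [y]) = if x = y then pvSuff u v + 1 else 0 := by
  simp [pvSuff, List.reverse_append, pvPref]

theorem pvLcsRow_spec (x : String) : ∀ (ys : List String) (ps : List Nat) (diag best : Nat),
    ps.length = ys.length →
    pvLcsRow x ys ps diag best
      = (pvNext x ys (diag :: ps), (pvNext x ys (diag :: ps)).foldl max best) := by
  intro ys
  induction ys with
  | nil =>
    intro ps diag best h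
    have : ps = [] := List.eq_nil_of_length_eq_zero (by simpa using h)
    subst this
    rfl
  | cons y ys ih =>
    intro ps diag best h
    cases ps with
    | nil => simp at h
    | cons p ps' =>
      simp only [pvLcsRow, pvNext, List.foldl_cons]
      generalize (if x = y then diag + 1 else 0) = v
      rw [show (if v > best then v else best) = max best v by by_cases hvb : v > best <;> simp [hvb] <;> omega]
      rw [ih ps' p (max best v) (by simpa using h)]

theorem pvNext_gen (x : String) (u : List String) : ∀ (ys v : List String),
    pvNext x ys (pvSuff u v :: (List.range ys.length).map (fun k => pvSuff u (v ++ ys.take (k+1))))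
      = (List.range ys.length).map (fun k => pvSuff (u ++ [x]) (v ++ ys.take (k+1))) := by
  intro ys
  induction ys with
  | nil => intro v; rfl
  | cons y ys ih =>
    intro v
    simp only [List.length_cons, List.range_succ_eq_map, List.map_cons, List.map_map,
      List.take_succ_cons, List.take_zero]
    have hcomp1 : ((fun k => pvSuff u (v ++ y :: ys.take k)) ∘ Nat.succ)
        = fun k => pvSuff u ((v ++ [y]) ++ ys.take (k+1)) := by
      funext k
      simp [Function.comp, List.append_assoc]
    have hcomp2 : ((fun k => pvSuff (u ++ [x]) (v ++ y :: ys.take k)) ∘ Nat.succ)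
        = fun k => pvSuff (u ++ [x]) ((v ++ [y]) ++ ys.take (k+1)) := by
      funext k
      simp [Function.comp, List.append_assoc]
    rw [hcomp1, hcomp2]
    simp only [pvNext]
    congr 1
    · exact (pvSuff_snoc u v x y).symm
    · exact ih (v ++ [y])

theorem pvRow_snoc (u lb : List String) (x : String) :
    pvRow (u ++ [x]) lb = pvNext x lb (0 :: pvRow u lb) := by
  have := pvNext_gen x u lb []
  simp only [pvSuff_nil_right, List.nil_append] at this
  unfold pvRow
  rw [← this]

@[simp] theorem pvRow_length (u lb : List String) : (pvRow u lb).length = lb.length := by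
  simp [pvRow]

theorem pvRow_nil (lb : List String) : pvRow [] lb = List.replicate lb.length 0 := by
  simp [pvRow, List.map_const']

theorem pvMaxL_replicate_zero (m : Nat) : pvMaxL (List.replicate m 0) = 0 :=
  Nat.le_zero.mp (pvMaxL_le (fun x hx => by simpa using (List.eq_of_mem_replicate hx).le))

theorem pvFold_inv (lb : List String) (u : List String) :
    u.foldl (fun st x => pvLcsRow x lb st.1 0 st.2) (List.replicate lb.length 0, 0)
      = (pvRow u lb, pvMaxL ((List.range (u.length + 1)).flatMap (fun i => pvRow (u.take i) lb))) := by
  induction u using List.reverseRecOn with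
  | nil =>
    simp [pvRow_nil, List.range_succ, pvMaxL_replicate_zero]
  | append_singleton u x ih =>
    rw [List.foldl_append, ih]
    show pvLcsRow x lb (pvRow u lb) 0
        (pvMaxL ((List.range (u.length + 1)).flatMap (fun i => pvRow (u.take i) lb))) = _
    rw [pvLcsRow_spec x lb (pvRow u lb) 0 _ (by simp)]
    rw [← pvRow_snoc]
    congr 1
    rw [show (u ++ [x]).length + 1 = (u.length + 1) + 1 by simp]
    rw [show List.range (u.length + 1 + 1) = List.range (u.length + 1) ++ [u.length + 1] from List.range_succ]
    rw [List.flatMap_append]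
    have hlast : [u.length + 1].flatMap (fun i => pvRow ((u ++ [x]).take i) lb) = pvRow (u ++ [x]) lb := by
      simp only [List.flatMap_cons, List.flatMap_nil, List.append_nil]
      rw [List.take_of_length_le (by simp)]
    have hinit : (List.range (u.length + 1)).flatMap (fun i => pvRow ((u ++ [x]).take i) lb)
        = (List.range (u.length + 1)).flatMap (fun i => pvRow (u.take i) lb) := by
      apply List.flatMap_congr
      intro i hi
      rw [List.take_append_of_le_length (by simpa using Nat.lt_succ_iff.mp (List.mem_range.mp hi))]
    rw [hlast, hinit]
    unfold pvMaxL
    rw [List.foldl_append]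

theorem pvLcsLen_eq (la lb : List String) : pvLcsLen la lb = pvMaxL (pvSuffList la lb) := by
  unfold pvLcsLen pvSuffList
  rw [pvFold_inv]

-- pvPref characterisation
theorem pvPref_le_left : ∀ (a b : List String), pvPref a b ≤ a.length := by
  intro a
  induction a with
  | nil => intro b; simp
  | cons x xs ih =>
    intro b
    cases b with
    | nil => simp
    | cons y ys =>
      simp only [pvPref, List.length_cons]
      split
      · exact Nat.succ_le_succ (ih ys)
      · omega

theorem pvPref_le_right : ∀ (a b : List String), pvPref a b ≤ b.length := by
  intro a
  induction a with
  | nil => intro b; simp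
  | cons x xs ih =>
    intro b
    cases b with
    | nil => simp
    | cons y ys =>
      simp only [pvPref, List.length_cons]
      split
      · exact Nat.succ_le_succ (ih ys)
      · omega

theorem pvPref_take_eq : ∀ (a b : List String), a.take (pvPref a b) = b.take (pvPref a b) := by
  intro a
  induction a with
  | nil => intro b; simp
  | cons x xs ih =>
    intro b
    cases b with
    | nil => simp
    | cons y ys =>
      simp only [pvPref]
      split
      · rename_i hxy
        simp only [List.take_succ_cons, hxy, ih ys]
      · simp

theorem le_pvPref_of_take_eq : ∀ (t : Nat) (a b : List String),
    a.take t = b.take t → t ≤ a.length → t ≤ pvPref a b := by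
  intro t
  induction t with
  | zero => intro a b _ _; exact Nat.zero_le _
  | succ t ih =>
    intro a b hteq hlen
    cases a with
    | nil => simp at hlen
    | cons x xs =>
      cases b with
      | nil => simp at hteq
      | cons y ys =>
        simp only [List.take_succ_cons, List.cons.injEq] at hteq
        obtain ⟨rfl, hteq⟩ := hteq
        have := ih xs ys hteq (by simpa using hlen)
        simp [pvPref]
        omega

-- pvSuff transfer lemmas
theorem pvSuff_char (u v : List String) :
    pvSuff u v ≤ u.length ∧ pvSuff u v ≤ v.length ∧
      u.drop (u.length - pvSuff u v) = v.drop (v.length - pvSuff u v) := by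
  unfold pvSuff
  refine ⟨by simpa using pvPref_le_left u.reverse v.reverse,
          by simpa using pvPref_le_right u.reverse v.reverse, ?_⟩
  have h := pvPref_take_eq u.reverse v.reverse
  rw [List.take_reverse, List.take_reverse] at h
  exact List.reverse_injective h

theorem le_pvSuff (u v : List String) (t : Nat) (hu : t ≤ u.length)
    (h : u.drop (u.length - t) = v.drop (v.length - t)) : t ≤ pvSuff u v := by
  unfold pvSuff
  apply le_pvPref_of_take_eq
  · rw [List.take_reverse, List.take_reverse, h]
  · simpa using hu

-- the two domination lemmas
theorem pvSuff_le_maxPref (la lb : List String) :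
    ∀ t ∈ pvSuffList la lb, t ≤ pvMaxL (pvPrefList la lb) := by
  intro t ht
  unfold pvSuffList pvRow at ht
  simp only [List.mem_flatMap, List.mem_map, List.mem_range] at ht
  obtain ⟨i, hi, k, hk, rfl⟩ := ht
  by_cases h0 : pvSuff (la.take i) (lb.take (k+1)) = 0
  · simp [h0]
  obtain ⟨h1, h2, h3⟩ := pvSuff_char (la.take i) (lb.take (k+1))
  set t := pvSuff (la.take i) (lb.take (k+1)) with hts
  have hil : i ≤ la.length := Nat.lt_succ_iff.mp hi
  have hkl : k + 1 ≤ lb.length := hk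
  rw [List.length_take_of_le hil] at h1 h3
  rw [List.length_take_of_le hkl] at h2 h3
  rw [List.drop_take, List.drop_take] at h3
  have e1 : i - (i - t) = t := by omega
  have e2 : (k+1) - ((k+1) - t) = t := by omega
  rw [e1, e2] at h3
  have hle : t ≤ pvPref (la.drop (i - t)) (lb.drop (k + 1 - t)) := by
    apply le_pvPref_of_take_eq t _ _ h3
    rw [List.length_drop]
    omega
  refine le_trans hle (le_pvMaxL ?_)
  unfold pvPrefList
  simp only [List.mem_flatMap, List.mem_map, List.mem_range]
  exact ⟨i - t, by omega, k + 1 - t, by omega, rfl⟩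

theorem pvPref_le_maxSuff (la lb : List String) :
    ∀ t ∈ pvPrefList la lb, t ≤ pvMaxL (pvSuffList la lb) := by
  intro t ht
  unfold pvPrefList at ht
  simp only [List.mem_flatMap, List.mem_map, List.mem_range] at ht
  obtain ⟨ai, hai, bi, hbi, rfl⟩ := ht
  by_cases h0 : pvPref (la.drop ai) (lb.drop bi) = 0
  · simp [h0]
  set t := pvPref (la.drop ai) (lb.drop bi) with hts
  have h1 : t ≤ la.length - ai := by simpa using pvPref_le_left (la.drop ai) (lb.drop bi)
  have h2 : t ≤ lb.length - bi := by simpa using pvPref_le_right (la.drop ai) (lb.drop bi)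
  have h3 := pvPref_take_eq (la.drop ai) (lb.drop bi)
  have hs : t ≤ pvSuff (la.take (ai + t)) (lb.take (bi + t)) := by
    apply le_pvSuff
    · rw [List.length_take_of_le (by omega)]; omega
    · rw [List.length_take_of_le (by omega), List.length_take_of_le (by omega)]
      rw [show ai + t - t = ai by omega, show bi + t - t = bi by omega]
      rw [List.drop_take, List.drop_take]
      rw [show ai + t - ai = t by omega, show bi + t - bi = t by omega]
      exact h3
  refine le_trans hs (le_pvMaxL ?_)
  unfold pvSuffList pvRow
  simp only [List.mem_flatMap, List.mem_map, List.mem_range]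
  refine ⟨ai + t, by omega, bi + t - 1, by omega, ?_⟩
  rw [show bi + t - 1 + 1 = bi + t by omega]

theorem pvMaxL_eq (la lb : List String) : pvMaxL (pvPrefList la lb) = pvMaxL (pvSuffList la lb) :=
  le_antisymm (pvMaxL_le (pvPref_le_maxSuff la lb)) (pvMaxL_le (pvSuff_le_maxPref la lb))

theorem pvPair_eq (la lb : List String) : pvMaxConsec la lb = pvLcsLen la lb := by
  rw [pvMaxConsec_eq, pvLcsLen_eq, pvMaxL_eq]

-- ===== VERDICT (by name: the statement is the Claim_ definition above) =====
theorem find_consecutive_duplicates_spec : Claim_equal_find_consecutive_duplicates := by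
  intro blocks threshold _
  unfold Spec_find_consecutive_duplicates find_consecutive_duplicates find_consecutive_duplicates_alt
  simp only [pvPair_eq]
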